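-- pv_equiv track=rewrite | github.com/ingvlt/master-project | scripts/pronoun_counting.py | count_pronouns
-- ===== SOURCE A (Python) =====
-- PRONOUNS = ['han', 'ham', 'hun', 'ho', 'henne', 'hen']
--
-- def count_pronouns(string):
--     pronoun_dict = {i: 0 for i in PRONOUNS}
--     words = string.split(" ")
--     count = 0
--     other = 0
--     for word in words:
--         if word.lower() in PRONOUNS:
--             pronoun_dict[word.lower()] += 1
--             count += 1
--         else:
--             other += 1
--     return count, other, pronoun_dict
-- ===== SOURCE B (Python) =====
-- PRONOUNS = ['han', 'ham', 'hun', 'ho', 'henne', 'hen']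
--
-- def count_pronouns(string):
--     # Aggregate first, then derive: one lowered word list, per-pronoun counts,
--     # count = sum of the table, other = total - count. No per-word branching.
--     lowered = [w.lower() for w in string.split(" ")]
--     pronoun_dict = {p: lowered.count(p) for p in PRONOUNS}
--     count = sum(pronoun_dict.values())
--     other = len(lowered) - count
--     return count, other, pronoun_dict
-- ===== Notes on version B (the rewrite author's own statement) =====
-- stated objective: alternative
-- what changed: B replaces A's per-word if/else accumulation into a running dict and two counters by an aggregate-then-derive decomposition: it lowers all words once, builds the pronoun table by counting each pronoun directly, then derives count as the table's sum and other by subtraction from the word total.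
import Mathlib
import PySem

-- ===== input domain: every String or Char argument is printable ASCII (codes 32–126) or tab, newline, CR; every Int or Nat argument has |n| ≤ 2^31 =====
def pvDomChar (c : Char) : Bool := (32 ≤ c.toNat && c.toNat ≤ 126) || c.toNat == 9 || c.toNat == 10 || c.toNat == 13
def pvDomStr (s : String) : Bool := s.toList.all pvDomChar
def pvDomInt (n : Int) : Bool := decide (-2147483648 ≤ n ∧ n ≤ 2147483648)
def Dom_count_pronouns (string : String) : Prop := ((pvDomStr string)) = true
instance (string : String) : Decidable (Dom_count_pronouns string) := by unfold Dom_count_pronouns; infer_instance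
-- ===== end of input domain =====

-- B replaces A's per-word if/else accumulation by aggregate-then-derive: lower all words once,
-- count each pronoun directly, sum the table for count and subtract for other (objective: alternative).

def pvPRONOUNS : List String := ["han", "ham", "hun", "ho", "henne", "hen"]

-- ===== PORT A =====
def count_pronouns (string : String) : Int × Int × (List (String × Int)) :=
  let pronoun_dict : PySem.Dict String Int := PySem.Dict.ofList (pvPRONOUNS.map (fun i => (i, 0)))
  let words : List String := (PySem.Str.split? string " ").getD []   -- sep " " ≠ "": split? is never none
  let st := words.foldl
    (fun (st : PySem.Dict String Int × Int × Int) word =>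
      if PySem.Str.lower word ∈ pvPRONOUNS then
        (st.1.modify (PySem.Str.lower word) 0 (· + 1), st.2.1 + 1, st.2.2)
      else
        (st.1, st.2.1, st.2.2 + 1))
    (pronoun_dict, 0, 0)
  (st.2.1, st.2.2, st.1.items)

-- ===== PORT B =====
def count_pronouns_alt (string : String) : Int × Int × (List (String × Int)) :=
  let lowered : List String := (((PySem.Str.split? string " ").getD []).map PySem.Str.lower)
  let pronoun_dict : List (String × Int) := pvPRONOUNS.map (fun p => (p, (lowered.count p : Int)))
  let count : Int := (pronoun_dict.map (·.2)).sum
  let other : Int := (lowered.length : Int) - count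
  (count, other, pronoun_dict)

-- ===== PRECONDITION & SPEC =====
def Spec_count_pronouns (string : String) (out : Int × Int × (List (String × Int))) : Prop := out = count_pronouns_alt string
instance (string : String) (out : Int × Int × (List (String × Int))) : Decidable (Spec_count_pronouns string out) := by unfold Spec_count_pronouns; infer_instance

-- ===== CLAIM (what is proved, stated in full; the proofs are below) =====
def Claim_equal_count_pronouns : Prop := ∀ (string : String), Dom_count_pronouns string → Spec_count_pronouns string (count_pronouns string)

-- ===== LEMMAS AND PROOFS =====

-- A's loop, split into its three independent components (dict of the pronoun hits, pronoun count, other count).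
lemma pv_loopA (ws : List String) (d : PySem.Dict String Int) (c o : Int) :
    ws.foldl
      (fun (st : PySem.Dict String Int × Int × Int) word =>
        if PySem.Str.lower word ∈ pvPRONOUNS then
          (st.1.modify (PySem.Str.lower word) 0 (· + 1), st.2.1 + 1, st.2.2)
        else
          (st.1, st.2.1, st.2.2 + 1)) (d, c, o) =
    (((ws.map PySem.Str.lower).filter (fun w => decide (w ∈ pvPRONOUNS))).foldl
        (fun d w => d.modify w 0 (· + 1)) d,
     c + ((ws.map PySem.Str.lower).countP (fun w => decide (w ∈ pvPRONOUNS)) : Int),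
     o + ((ws.map PySem.Str.lower).countP (fun w => decide (¬ w ∈ pvPRONOUNS)) : Int)) := by
  induction ws generalizing d c o with
  | nil => simp
  | cons w ws ih =>
    by_cases h : PySem.Str.lower w ∈ pvPRONOUNS <;>
      simp [List.foldl_cons, h, ih] <;> ring

-- a 0/1 sum over the distinct pronoun list detects membership
lemma pv_sum_ite (w : String) :
    ((pvPRONOUNS.map (fun p => if w = p then (1 : Int) else 0)).sum)
      = if w ∈ pvPRONOUNS then 1 else 0 := by
  by_cases h : w ∈ pvPRONOUNS
  · simp only [pvPRONOUNS, List.mem_cons, List.not_mem_nil, or_false] at h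
    rcases h with h | h | h | h | h | h <;> subst h <;> decide
  · simp only [pvPRONOUNS, List.mem_cons, List.not_mem_nil, or_false,
      not_or] at h
    obtain ⟨h1, h2, h3, h4, h5, h6⟩ := h
    simp [pvPRONOUNS, h1, h2, h3, h4, h5, h6]

-- the number of pronoun hits is the sum of the per-pronoun counts
lemma pv_countP_eq_sum (ls : List String) :
    ((ls.countP (fun w => decide (w ∈ pvPRONOUNS))) : Int)
      = (pvPRONOUNS.map (fun p => ((ls.count p : Int)))).sum := by
  induction ls with
  | nil => simp
  | cons w ls ih =>
    have hc : ∀ p : String, ((w :: ls).count p : Int)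
        = (ls.count p : Int) + (if w = p then (1 : Int) else 0) := by
      intro p
      by_cases h : w = p <;> simp [h]
    simp only [List.countP_cons, hc]
    rw [PySem.List.sum_map_add_int, pv_sum_ite, ← ih]
    by_cases h : w ∈ pvPRONOUNS <;> simp [h]

-- a Set.update that adds only already-present elements is the identity
lemma pv_set_update_id (s : PySem.Set String) (xs : List String) (h : ∀ x ∈ xs, x ∈ s) :
    PySem.Set.update s xs = s := by
  induction xs generalizing s with
  | nil => simp [PySem.Set.update]
  | cons x xs ih =>
    simp only [PySem.Set.update, List.foldl_cons] at *
    rw [show PySem.Set.add s x = s from by simp [PySem.Set.add, h x (by simp)]]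
    exact ih s (fun y hy => h y (by simp [hy]))

-- ===== VERDICT (by name: the statement is the Claim_ definition above) =====
theorem count_pronouns_spec : Claim_equal_count_pronouns := by
  intro string _
  show count_pronouns string = count_pronouns_alt string
  simp only [count_pronouns, count_pronouns_alt]
  rw [pv_loopA]
  set ls := (((PySem.Str.split? string " ").getD []).map PySem.Str.lower) with hls
  have hcount := pv_countP_eq_sum ls
  have hsplit : (ls.countP fun w => decide (w ∈ pvPRONOUNS))
      + (ls.countP fun w => decide (¬ w ∈ pvPRONOUNS)) = ls.length := by
    simpa using (List.length_eq_countP_add_countP (fun w => decide (w ∈ pvPRONOUNS)) (l := ls)).symm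
  refine Prod.ext ?_ (Prod.ext ?_ ?_) <;> dsimp only
  · simpa [List.map_map] using hcount
  · simp only [List.map_map, Function.comp_def]
    rw [← hcount]
    omega
  · have hkeys : ((ls.filter (fun w => decide (w ∈ pvPRONOUNS))).foldl
        (fun d w => d.modify w 0 (· + 1))
        (PySem.Dict.ofList (pvPRONOUNS.map (fun i => (i, (0 : Int)))))).keys = pvPRONOUNS := by
      rw [PySem.Dict.keys_foldl_modify (f := fun _ _ => (· + 1))]
      rw [show (PySem.Dict.ofList (pvPRONOUNS.map (fun i => (i, (0 : Int))))).keys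
            = pvPRONOUNS from by decide]
      exact pv_set_update_id _ _ (fun x hx => by
        have := List.of_mem_filter hx
        simpa using this)
    rw [PySem.Dict.items_eq_map_keys _ (by rw [hkeys]; decide) 0, hkeys]
    apply List.map_congr_left
    intro p hp
    rw [PySem.Dict.getD_foldl_modify_add_one]
    rw [List.count_filter (by simpa using hp)]
    rw [show (PySem.Dict.ofList (pvPRONOUNS.map (fun i => (i, (0 : Int))))).getD p 0
          = 0 from by fin_cases hp <;> decide]
    simp
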